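-- pv_equiv track=rewrite | github.com/operator-ita/b1sl-python | scripts/b1sl_metadata_generator/mapper.py | map_edm_type
-- ===== SOURCE A (Python) =====
-- EDM_TYPE_MAP: dict[str, str] = {
--     "Edm.String":          "str",
--     "Edm.Guid":            "str",
--     "Edm.Int16":           "int",
--     "Edm.Int32":           "int",
--     "Edm.Int64":           "int",
--     "Edm.Byte":            "int",
--     "Edm.SByte":           "int",
--     "Edm.Decimal":         "float",
--     "Edm.Single":          "float",
--     "Edm.Double":          "float",
--     "Edm.Date":            "str",
--     "Edm.DateTime":        "str",
--     "Edm.DateTimeOffset":  "str",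
--     "Edm.Time":            "str",
--     "Edm.TimeOfDay":       "str",
--     "Edm.Duration":        "str",
--     "Edm.Boolean":         "SapBool",
--     "Edm.Binary":          "bytes",
--     "Edm.Stream":          "bytes",
-- }
--
-- def map_edm_type(edm_type: str, enum_types: set[str], complex_types: set[str]) -> tuple[str, set[str]]:
--     """
--     Returns (python_type_string, required_imports_set).
--     Python type is wrapped in Optional[] by the generator for non-key fields.
--     """
--     imports: set[str] = set()
--
--     if edm_type.startswith("Collection(") and edm_type.endswith(")"):
--         inner = edm_type[11:-1]
--         inner_py, inner_imports = map_edm_type(inner, enum_types, complex_types)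
--         imports.update(inner_imports)
--         return f"list[{inner_py}]", imports
--
--     # Check if it's an enum or complex type
--     clean_type = edm_type.split(".")[-1]
--     if clean_type in enum_types:
--         if clean_type in ("BoYesNoEnum", "BoYesNoNoneEnum"):
--             return "SapBool", {"from b1sl.b1sl.models.base import SapBool"}
--         return clean_type, {f"from .enums import {clean_type}"}
--     if clean_type in complex_types:
--         # Use direct class reference for complex types (supported by from __future__ import annotations)
--         return clean_type, set()
--
--     # Default to primitive map
--     python_type = EDM_TYPE_MAP.get(edm_type, "Any")
--     if python_type == "Any":
--         imports.add("from typing import Any")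
--     elif python_type == "SapBool":
--         imports.add("from b1sl.b1sl.models.base import SapBool")
--
--     return python_type, imports
-- ===== SOURCE B (Python) =====
-- EDM_TYPE_MAP: dict[str, str] = {
--     "Edm.String":          "str",
--     "Edm.Guid":            "str",
--     "Edm.Int16":           "int",
--     "Edm.Int32":           "int",
--     "Edm.Int64":           "int",
--     "Edm.Byte":            "int",
--     "Edm.SByte":           "int",
--     "Edm.Decimal":         "float",
--     "Edm.Single":          "float",
--     "Edm.Double":          "float",
--     "Edm.Date":            "str",
--     "Edm.DateTime":        "str",
--     "Edm.DateTimeOffset":  "str",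
--     "Edm.Time":            "str",
--     "Edm.TimeOfDay":       "str",
--     "Edm.Duration":        "str",
--     "Edm.Boolean":         "SapBool",
--     "Edm.Binary":          "bytes",
--     "Edm.Stream":          "bytes",
-- }
--
--
-- def _classify_core(core: str, enum_types: set[str], complex_types: set[str]) -> tuple[str, set[str]]:
--     """Classify a non-collection EDM type into (python type, imports)."""
--     clean_type = core.split(".")[-1]
--     if clean_type in enum_types:
--         if clean_type in ("BoYesNoEnum", "BoYesNoNoneEnum"):
--             return "SapBool", {"from b1sl.b1sl.models.base import SapBool"}
--         return clean_type, {f"from .enums import {clean_type}"}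
--     if clean_type in complex_types:
--         return clean_type, set()
--     python_type = EDM_TYPE_MAP.get(core, "Any")
--     if python_type == "Any":
--         return python_type, {"from typing import Any"}
--     if python_type == "SapBool":
--         return python_type, {"from b1sl.b1sl.models.base import SapBool"}
--     return python_type, set()
--
--
-- def map_edm_type(edm_type: str, enum_types: set[str], complex_types: set[str]) -> tuple[str, set[str]]:
--     # Iteratively peel Collection(...) wrappers, counting the depth; no recursion.
--     depth = 0
--     while edm_type.startswith("Collection(") and edm_type.endswith(")"):
--         edm_type = edm_type[11:-1]
--         depth += 1
--     core_py, imports = _classify_core(edm_type, enum_types, complex_types)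
--     return "list[" * depth + core_py + "]" * depth, imports
-- ===== Notes on version B (the rewrite author's own statement) =====
-- stated objective: alternative
-- what changed: Replaces the Collection(...) recursion by an iterative while loop with a depth counter that strips all wrappers first, then classifies the core type once and rebuilds the list[...] nesting by string multiplication.
import Mathlib
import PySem

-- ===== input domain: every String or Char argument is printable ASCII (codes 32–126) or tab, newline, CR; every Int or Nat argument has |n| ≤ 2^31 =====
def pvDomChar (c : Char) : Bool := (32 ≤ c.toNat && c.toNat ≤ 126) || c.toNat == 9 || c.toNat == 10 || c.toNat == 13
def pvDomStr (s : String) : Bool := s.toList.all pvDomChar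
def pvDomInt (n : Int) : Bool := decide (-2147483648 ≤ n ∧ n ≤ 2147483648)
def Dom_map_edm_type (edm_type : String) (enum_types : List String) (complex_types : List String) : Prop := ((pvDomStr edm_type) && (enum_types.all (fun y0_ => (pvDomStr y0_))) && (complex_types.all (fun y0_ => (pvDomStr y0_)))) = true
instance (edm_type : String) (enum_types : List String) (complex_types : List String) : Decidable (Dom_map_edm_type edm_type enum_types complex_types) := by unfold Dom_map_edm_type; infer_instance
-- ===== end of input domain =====

-- B replaces A's Collection(...) recursion by an iterative strip-the-wrappers loop with a
-- depth counter, classifying the core type once and rebuilding the list[...] nesting afterwards.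

-- shared module-level constant EDM_TYPE_MAP (dict → association list)
def edmTypeMap : PySem.Dict String String :=
  PySem.Dict.ofList
  [("Edm.String", "str"), ("Edm.Guid", "str"), ("Edm.Int16", "int"), ("Edm.Int32", "int"),
   ("Edm.Int64", "int"), ("Edm.Byte", "int"), ("Edm.SByte", "int"), ("Edm.Decimal", "float"),
   ("Edm.Single", "float"), ("Edm.Double", "float"), ("Edm.Date", "str"), ("Edm.DateTime", "str"),
   ("Edm.DateTimeOffset", "str"), ("Edm.Time", "str"), ("Edm.TimeOfDay", "str"),
   ("Edm.Duration", "str"), ("Edm.Boolean", "SapBool"), ("Edm.Binary", "bytes"),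
   ("Edm.Stream", "bytes")]

-- the stripped wrapper is strictly shorter (termination of both ports' Collection loops)
theorem pvStripShorter (s : String)
    (h : (PySem.Str.startswith s "Collection(" && PySem.Str.endswith s ")") = true) :
    (PySem.Str.slice s (some 11) (some (-1))).toList.length < s.toList.length := by
  have h1 : PySem.Str.startswith s "Collection(" = true := by
    cases hb : PySem.Str.startswith s "Collection(" with
    | true => rfl
    | false => rw [hb] at h; simp at h
  have hpre : ("Collection(".toList) <+: s.toList := by
    have h2 : PySem.Chars.startswith s.toList ("Collection(".toList) = true := by
      simpa using h1
    exact (PySem.Chars.startswith_iff _ _).1 h2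
  have hlen : 11 ≤ s.toList.length := by
    have h3 := hpre.length_le
    have h4 : ("Collection(".toList).length = 11 := by decide
    omega
  rw [PySem.Str.toList_slice, PySem.Chars.slice_eq_listSlice, PySem.List.length_slice,
      PySem.List.clampIdx_neg_one]
  have h11 : PySem.List.clampIdx s.toList.length 11 = 11 := by
    rw [show (11 : Int) = ((11 : Nat) : Int) by norm_num, PySem.List.clampIdx_natCast]
    omega
  rw [h11]
  omega

-- ===== PORT A =====
-- literal transliteration of A: recursion on the Collection(...) wrapper
-- (split(".")[-1]: split never returns an empty list, so [-1] is exactly getLastD)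
def map_edm_type (edm_type : String) (enum_types : List String) (complex_types : List String) : String × List String :=
  if h : (PySem.Str.startswith edm_type "Collection(" && PySem.Str.endswith edm_type ")") = true then
    let inner := PySem.Str.slice edm_type (some 11) (some (-1))
    let r := map_edm_type inner enum_types complex_types
    ("list[" ++ r.1 ++ "]", r.2)
  else
    let clean_type := String.ofList ((PySem.Chars.splitOn edm_type.toList ['.']).getLastD [])
    if enum_types.contains clean_type then
      if clean_type = "BoYesNoEnum" || clean_type = "BoYesNoNoneEnum" then
        ("SapBool", ["from b1sl.b1sl.models.base import SapBool"])
      else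
        (clean_type, ["from .enums import " ++ clean_type])
    else if complex_types.contains clean_type then
      (clean_type, [])
    else
      let python_type := PySem.Dict.getD edmTypeMap edm_type "Any"
      if python_type = "Any" then (python_type, ["from typing import Any"])
      else if python_type = "SapBool" then (python_type, ["from b1sl.b1sl.models.base import SapBool"])
      else (python_type, [])
termination_by edm_type.toList.length
decreasing_by exact pvStripShorter edm_type h

-- ===== PORT B =====
-- B's while loop: strip Collection( ... ) wrappers, counting the depth
def stripCollections (edm_type : String) (depth : Nat) : String × Nat :=
  if h : (PySem.Str.startswith edm_type "Collection(" && PySem.Str.endswith edm_type ")") = true then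
    stripCollections (PySem.Str.slice edm_type (some 11) (some (-1))) (depth + 1)
  else (edm_type, depth)
termination_by edm_type.toList.length
decreasing_by exact pvStripShorter edm_type h

-- B's helper _classify_core
def classifyCore (core : String) (enum_types : List String) (complex_types : List String) : String × List String :=
  let clean_type := String.ofList ((PySem.Chars.splitOn core.toList ['.']).getLastD [])
  if enum_types.contains clean_type then
    if clean_type = "BoYesNoEnum" || clean_type = "BoYesNoNoneEnum" then
      ("SapBool", ["from b1sl.b1sl.models.base import SapBool"])
    else
      (clean_type, ["from .enums import " ++ clean_type])
  else if complex_types.contains clean_type then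
    (clean_type, [])
  else
    let python_type := PySem.Dict.getD edmTypeMap core "Any"
    if python_type = "Any" then (python_type, ["from typing import Any"])
    else if python_type = "SapBool" then (python_type, ["from b1sl.b1sl.models.base import SapBool"])
    else (python_type, [])

-- Python's  s * n  on strings (exact: n-fold concatenation)
def strMul (s : String) : Nat → String
  | 0 => ""
  | n + 1 => s ++ strMul s n

def map_edm_type_alt (edm_type : String) (enum_types : List String) (complex_types : List String) : String × List String :=
  let sc := stripCollections edm_type 0
  let r := classifyCore sc.1 enum_types complex_types
  (strMul "list[" sc.2 ++ r.1 ++ strMul "]" sc.2, r.2)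

-- ===== PRECONDITION & SPEC =====
def Spec_map_edm_type (edm_type : String) (enum_types : List String) (complex_types : List String) (out : String × List String) : Prop := out = map_edm_type_alt edm_type enum_types complex_types
instance (edm_type : String) (enum_types : List String) (complex_types : List String) (out : String × List String) : Decidable (Spec_map_edm_type edm_type enum_types complex_types out) := by unfold Spec_map_edm_type; infer_instance

-- ===== CLAIM (what is proved, stated in full; the proofs are below) =====
def Claim_equal_map_edm_type : Prop := ∀ (edm_type : String) (enum_types : List String) (complex_types : List String), Dom_map_edm_type edm_type enum_types complex_types → Spec_map_edm_type edm_type enum_types complex_types (map_edm_type edm_type enum_types complex_types)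

-- ===== LEMMAS AND PROOFS =====

theorem strMul_comm (s : String) (n : Nat) : strMul s n ++ s = s ++ strMul s n := by
  induction n with
  | zero => simp [strMul]
  | succ n ih => simp only [strMul, String.append_assoc, ih]

theorem stripCollections_step (s : String) (d : Nat)
    (h : (PySem.Str.startswith s "Collection(" && PySem.Str.endswith s ")") = true) :
    stripCollections s d = stripCollections (PySem.Str.slice s (some 11) (some (-1))) (d + 1) := by
  rw [stripCollections]
  rw [dif_pos h]

theorem stripCollections_stop (s : String) (d : Nat)
    (h : ¬ (PySem.Str.startswith s "Collection(" && PySem.Str.endswith s ")") = true) :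
    stripCollections s d = (s, d) := by
  rw [stripCollections]
  rw [dif_neg h]

theorem stripCollections_depth_aux : ∀ (n : Nat) (s : String), s.toList.length ≤ n → ∀ (d : Nat),
    stripCollections s d = ((stripCollections s 0).1, (stripCollections s 0).2 + d) := by
  intro n
  induction n with
  | zero =>
    intro s hs d
    by_cases h : (PySem.Str.startswith s "Collection(" && PySem.Str.endswith s ")") = true
    · have := pvStripShorter s h
      omega
    · rw [stripCollections_stop s d h, stripCollections_stop s 0 h]
      simp
  | succ n ih =>
    intro s hs d
    by_cases h : (PySem.Str.startswith s "Collection(" && PySem.Str.endswith s ")") = true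
    · have hlt := pvStripShorter s h
      rw [stripCollections_step s d h, stripCollections_step s 0 h]
      rw [ih _ (by omega) (d + 1), ih _ (by omega) 1]
      simp only [Prod.mk.injEq, true_and]
      omega
    · rw [stripCollections_stop s d h, stripCollections_stop s 0 h]
      simp

theorem stripCollections_depth (s : String) (d : Nat) :
    stripCollections s d = ((stripCollections s 0).1, (stripCollections s 0).2 + d) :=
  stripCollections_depth_aux s.toList.length s (le_refl _) d

theorem strMul_wrap (k : Nat) (r : String) :
    "list[" ++ (strMul "list[" k ++ r ++ strMul "]" k) ++ "]" =
      strMul "list[" (k + 1) ++ r ++ strMul "]" (k + 1) := by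
  have hB : strMul "]" k ++ "]" = "]" ++ strMul "]" k := strMul_comm "]" k
  calc "list[" ++ (strMul "list[" k ++ r ++ strMul "]" k) ++ "]"
      = "list[" ++ (strMul "list[" k ++ (r ++ (strMul "]" k ++ "]"))) := by
        simp [String.append_assoc]
    _ = "list[" ++ (strMul "list[" k ++ (r ++ ("]" ++ strMul "]" k))) := by rw [hB]
    _ = ("list[" ++ strMul "list[" k) ++ r ++ ("]" ++ strMul "]" k) := by
        simp [String.append_assoc]
    _ = strMul "list[" (k + 1) ++ r ++ strMul "]" (k + 1) := by simp only [strMul]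

theorem map_edm_type_eq_alt_aux : ∀ (n : Nat) (s : String), s.toList.length ≤ n →
    ∀ (en co : List String), map_edm_type s en co = map_edm_type_alt s en co := by
  intro n
  induction n with
  | zero =>
    intro s hs en co
    by_cases h : (PySem.Str.startswith s "Collection(" && PySem.Str.endswith s ")") = true
    · have := pvStripShorter s h
      omega
    · rw [map_edm_type, dif_neg h]
      show classifyCore s en co = map_edm_type_alt s en co
      simp only [map_edm_type_alt]
      rw [stripCollections_stop s 0 h]
      simp [strMul, String.empty_append, String.append_empty]
  | succ n ih =>
    intro s hs en co
    by_cases h : (PySem.Str.startswith s "Collection(" && PySem.Str.endswith s ")") = true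
    · have hlt := pvStripShorter s h
      rw [map_edm_type, dif_pos h]
      simp only []
      rw [ih _ (by omega) en co]
      simp only [map_edm_type_alt]
      rw [stripCollections_step s 0 h]
      simp only [Nat.zero_add]
      rw [stripCollections_depth _ 1]
      simp only [Prod.mk.injEq, and_true]
      exact strMul_wrap _ _
    · rw [map_edm_type, dif_neg h]
      show classifyCore s en co = map_edm_type_alt s en co
      simp only [map_edm_type_alt]
      rw [stripCollections_stop s 0 h]
      simp [strMul, String.empty_append, String.append_empty]

theorem map_edm_type_eq_alt (s : String) (en co : List String) :
    map_edm_type s en co = map_edm_type_alt s en co :=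
  map_edm_type_eq_alt_aux s.toList.length s (le_refl _) en co

-- ===== VERDICT (by name: the statement is the Claim_ definition above) =====
theorem map_edm_type_spec : Claim_equal_map_edm_type := by
  intro edm_type enum_types complex_types _
  unfold Spec_map_edm_type
  exact map_edm_type_eq_alt edm_type enum_types complex_types
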